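-- pv_equiv track=rewrite | github.com/KruglovEgor/Compilers | lab1/main.py | simulate_dfa
-- ===== SOURCE A (Python) =====
-- def simulate_dfa(input_str):
--     """
--     Моделирует работу ДКА для языка с нечетным числом вхождений подстроки 'ab'
--     Алфавит: {a, b, c}
--
--     Состояния:
--       S0: чётное число 'ab', нет подвешенного 'a'
--       S1: чётное число 'ab', есть подвешенное 'a'
--       S2: нечетное число 'ab', нет подвешенного 'a'
--       S3: нечетное число 'ab', есть подвешенное 'a'
--
--     Допускающие состояния: S2 и S3
--     """
--     # Начальное состояние: S0
--     state = 'S0'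
--
--     # Переходы
--     transitions_dic = {
--         'S0': {
--             'a': 'S1',
--             'b': 'S0',
--             'c': 'S0'
--         },
--         'S1': {
--             'a': 'S1',
--             'b': 'S2',
--             'c': 'S0'
--         },
--         'S2': {
--             'a': 'S3',
--             'b': 'S2',
--             'c': 'S2'
--         },
--         'S3': {
--             'a': 'S3',
--             'b': 'S0',
--             'c': 'S2'
--         }
--     }
--
--     # Допускающие состояния
--     exit_states = ('S2', 'S3')
--
--     for ch in input_str:
--         possible_transitions = transitions_dic[state]
--         if ch in possible_transitions:
--             state = possible_transitions[ch]
--         else: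
--             # Неизвестный символ (не из нашего алфавита)
--             return False
--
--     return state in exit_states
-- ===== SOURCE B (Python) =====
-- def simulate_dfa(input_str):
--     # Reject any character outside the alphabet {a, b, c}.
--     if any(ch not in 'abc' for ch in input_str):
--         return False
--     # Accept iff the number of adjacent 'ab' pairs is odd.
--     pairs = sum(1 for x, y in zip(input_str, input_str[1:]) if x == 'a' and y == 'b')
--     return pairs % 2 == 1
-- ===== Notes on version B (the rewrite author's own statement) =====
-- stated objective: simpler
-- what changed: Replaced the explicit 4-state DFA transition-table simulation with a validation pass over the alphabet followed by counting adjacent 'ab' pairs and testing the count's parity.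
import Mathlib
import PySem

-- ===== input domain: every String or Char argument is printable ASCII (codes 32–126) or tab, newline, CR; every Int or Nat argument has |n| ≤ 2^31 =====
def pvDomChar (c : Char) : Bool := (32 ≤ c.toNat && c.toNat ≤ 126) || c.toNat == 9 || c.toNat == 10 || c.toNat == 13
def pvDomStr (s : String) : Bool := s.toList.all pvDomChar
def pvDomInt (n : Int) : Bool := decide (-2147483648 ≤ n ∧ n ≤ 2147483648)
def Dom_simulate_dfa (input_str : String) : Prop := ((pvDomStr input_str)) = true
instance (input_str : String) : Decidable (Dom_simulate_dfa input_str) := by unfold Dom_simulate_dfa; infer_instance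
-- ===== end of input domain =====

-- B replaces A's 4-state transition-table DFA simulation by an alphabet-validation pass
-- followed by a parity test of the number of adjacent 'ab' pairs (objective: simpler).


-- ===== PORT A =====
-- transitions_dic: dict of dicts in insertion order (keys: the state name, then the 1-char alphabet strings)
def pvTransitions : PySem.Dict String (PySem.Dict String String) :=
  PySem.Dict.mk
    [("S0", PySem.Dict.mk [("a", "S1"), ("b", "S0"), ("c", "S0")]),
     ("S1", PySem.Dict.mk [("a", "S1"), ("b", "S2"), ("c", "S0")]),
     ("S2", PySem.Dict.mk [("a", "S3"), ("b", "S2"), ("c", "S2")]),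
     ("S3", PySem.Dict.mk [("a", "S3"), ("b", "S0"), ("c", "S2")])]

def pvSimLoop (state : String) : List Char → Bool
  | [] => state == "S2" || state == "S3"
  | ch :: rest =>
    let possible := (PySem.Dict.get? pvTransitions state).getD (PySem.Dict.mk [])
    match PySem.Dict.get? possible (String.singleton ch) with
    | some s' => pvSimLoop s' rest
    | none => false


def simulate_dfa (input_str : String) : Bool := pvSimLoop "S0" input_str.toList

-- ===== PORT B =====
def simulate_dfa_alt (input_str : String) : Bool :=
  let l := input_str.toList
  if l.any (fun c => !(['a', 'b', 'c'].contains c)) then false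
  else
    let pairs := ((l.zip l.tail).filter (fun p => p.1 == 'a' && p.2 == 'b')).length
    pairs % 2 == 1

-- ===== PRECONDITION & SPEC =====
def Spec_simulate_dfa (input_str : String) (out : Bool) : Prop := out = simulate_dfa_alt input_str
instance (input_str : String) (out : Bool) : Decidable (Spec_simulate_dfa input_str out) := by unfold Spec_simulate_dfa; infer_instance

-- ===== CLAIM (what is proved, stated in full; the proofs are below) =====
def Claim_equal_simulate_dfa : Prop := ∀ (input_str : String), Dom_simulate_dfa input_str → Spec_simulate_dfa input_str (simulate_dfa input_str)

-- ===== LEMMAS AND PROOFS =====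

def pvG (odd pend : Bool) : List Char → Bool
  | [] => odd
  | c :: rest =>
    if c = 'a' then pvG odd true rest
    else if c = 'b' then pvG (if pend then !odd else odd) false rest
    else if c = 'c' then pvG odd false rest
    else false

def pvStName (odd pend : Bool) : String :=
  match odd, pend with
  | false, false => "S0"
  | false, true  => "S1"
  | true,  false => "S2"
  | true,  true  => "S3"

lemma pvKeyBeqA (c : Char) : (("a" : String) == String.singleton c) = ('a' == c) := by
  rw [Bool.eq_iff_iff]
  constructor
  · intro h
    have h2 : ("a" : String).toList = (String.singleton c).toList := by rw [eq_of_beq h]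
    simp [String.singleton] at h2; exact beq_of_eq h2
  · intro h
    have h' : 'a' = c := eq_of_beq h
    subst h'; decide

lemma pvKeyBeqB (c : Char) : (("b" : String) == String.singleton c) = ('b' == c) := by
  rw [Bool.eq_iff_iff]
  constructor
  · intro h
    have h2 : ("b" : String).toList = (String.singleton c).toList := by rw [eq_of_beq h]
    simp [String.singleton] at h2; exact beq_of_eq h2
  · intro h
    have h' : 'b' = c := eq_of_beq h
    subst h'; decide

lemma pvKeyBeqC (c : Char) : (("c" : String) == String.singleton c) = ('c' == c) := by
  rw [Bool.eq_iff_iff]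
  constructor
  · intro h
    have h2 : ("c" : String).toList = (String.singleton c).toList := by rw [eq_of_beq h]
    simp [String.singleton] at h2; exact beq_of_eq h2
  · intro h
    have h' : 'c' = c := eq_of_beq h
    subst h'; decide

lemma pvSimLoop_eq_pvG (l : List Char) : ∀ odd pend : Bool,
    pvSimLoop (pvStName odd pend) l = pvG odd pend l := by
  induction l with
  | nil => intro odd pend; cases odd <;> cases pend <;> rfl
  | cons c rest ih =>
    intro odd pend
    by_cases ha : c = 'a'
    · subst ha
      cases odd <;> cases pend <;>
        simpa [pvSimLoop, pvTransitions, PySem.Dict.get?, pvG, pvStName,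
               pvKeyBeqA, pvKeyBeqB, pvKeyBeqC]
          using (by first | exact ih false true | exact ih true true)
    · by_cases hb : c = 'b'
      · subst hb
        cases odd <;> cases pend <;>
          simpa [pvSimLoop, pvTransitions, PySem.Dict.get?, pvG, pvStName,
                 pvKeyBeqA, pvKeyBeqB, pvKeyBeqC]
            using (by first | exact ih false false | exact ih true false)
      · by_cases hc : c = 'c'
        · subst hc
          cases odd <;> cases pend <;>
            simpa [pvSimLoop, pvTransitions, PySem.Dict.get?, pvG, pvStName,
                   pvKeyBeqA, pvKeyBeqB, pvKeyBeqC]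
              using (by first | exact ih false false | exact ih true false)
        · have ea : ('a' == c) = false := beq_eq_false_iff_ne.mpr (fun h => ha h.symm)
          have eb : ('b' == c) = false := beq_eq_false_iff_ne.mpr (fun h => hb h.symm)
          have ec : ('c' == c) = false := beq_eq_false_iff_ne.mpr (fun h => hc h.symm)
          cases odd <;> cases pend <;>
            simp [pvSimLoop, pvTransitions, PySem.Dict.get?, pvG, pvStName,
                  pvKeyBeqA, pvKeyBeqB, pvKeyBeqC, ha, hb, hc, List.find?, ea, eb, ec]

def pvCnt (l : List Char) : Nat :=
  ((l.zip l.tail).filter (fun p => p.1 == 'a' && p.2 == 'b')).length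

lemma pvCnt_cons (x : Char) (l : List Char) :
    pvCnt (x :: l) = (if x = 'a' ∧ l.head? = some 'b' then 1 else 0) + pvCnt l := by
  cases l with
  | nil => simp [pvCnt]
  | cons y r =>
    simp only [pvCnt, List.tail_cons, List.zip_cons_cons, List.filter_cons, List.head?_cons]
    by_cases hx : x = 'a' <;> by_cases hy : y = 'b' <;> simp_all [Nat.add_comm]

lemma pvG_invalid (l : List Char) : ∀ odd pend : Bool,
    (¬ ∀ c ∈ l, c = 'a' ∨ c = 'b' ∨ c = 'c') → pvG odd pend l = false := by
  induction l with
  | nil => intro odd pend h; exact absurd (by simp) h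
  | cons c rest ih =>
    intro odd pend h
    by_cases ha : c = 'a'
    · subst ha
      rw [show pvG odd pend ('a' :: rest) = pvG odd true rest from rfl]
      exact ih odd true (fun hr => h (List.forall_mem_cons.mpr ⟨Or.inl rfl, hr⟩))
    · by_cases hb : c = 'b'
      · subst hb
        rw [show pvG odd pend ('b' :: rest) = pvG (if pend then !odd else odd) false rest from rfl]
        exact ih _ false (fun hr => h (List.forall_mem_cons.mpr ⟨Or.inr (Or.inl rfl), hr⟩))
      · by_cases hc : c = 'c'
        · subst hc
          rw [show pvG odd pend ('c' :: rest) = pvG odd false rest from rfl]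
          exact ih odd false (fun hr => h (List.forall_mem_cons.mpr ⟨Or.inr (Or.inr rfl), hr⟩))
        · simp [pvG, ha, hb, hc]

lemma pvG_valid (l : List Char) : ∀ odd pend : Bool,
    (∀ c ∈ l, c = 'a' ∨ c = 'b' ∨ c = 'c') →
    pvG odd pend l =
      decide ((pvCnt l + (if pend = true ∧ l.head? = some 'b' then 1 else 0)
                + (if odd = true then 1 else 0)) % 2 = 1) := by
  induction l with
  | nil =>
    intro odd pend _
    cases odd <;> simp [pvG, pvCnt]
  | cons c rest ih =>
    intro odd pend hv
    have hvr : ∀ x ∈ rest, x = 'a' ∨ x = 'b' ∨ x = 'c' := fun x hx => hv x (List.mem_cons_of_mem _ hx)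
    rcases hv c List.mem_cons_self with ha | hb | hc
    · subst ha
      rw [show pvG odd pend ('a' :: rest) = pvG odd true rest from rfl, ih odd true hvr,
          pvCnt_cons, decide_eq_decide, List.head?_cons]
      by_cases hh : rest.head? = some 'b' <;> cases odd <;> cases pend <;>
        simp [hh] <;> omega
    · subst hb
      rw [show pvG odd pend ('b' :: rest) = pvG (if pend then !odd else odd) false rest from rfl,
          ih _ false hvr, pvCnt_cons, decide_eq_decide, List.head?_cons]
      by_cases hh : rest.head? = some 'b' <;> cases odd <;> cases pend <;>
        simp [hh] <;> omega
    · subst hc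
      rw [show pvG odd pend ('c' :: rest) = pvG odd false rest from rfl, ih odd false hvr,
          pvCnt_cons, decide_eq_decide, List.head?_cons]
      by_cases hh : rest.head? = some 'b' <;> cases odd <;> cases pend <;>
        simp [hh] <;> omega

-- ===== VERDICT (by name: the statement is the Claim_ definition above) =====
theorem simulate_dfa_spec : Claim_equal_simulate_dfa := by
  intro s _
  unfold Spec_simulate_dfa
  simp only [simulate_dfa, simulate_dfa_alt]
  have h0 : pvSimLoop "S0" s.toList = pvG false false s.toList := pvSimLoop_eq_pvG s.toList false false
  by_cases hv : ∀ c ∈ s.toList, c = 'a' ∨ c = 'b' ∨ c = 'c'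
  · have hany : s.toList.any (fun c => !(['a', 'b', 'c'].contains c)) = false := by
      simp only [List.any_eq_false]
      intro c hc
      rcases hv c hc with h | h | h <;> simp [h]
    rw [h0, pvG_valid s.toList false false hv, hany]
    simp only [if_false, Bool.false_eq_true]
    rw [show ((s.toList.zip s.toList.tail).filter (fun p => p.1 == 'a' && p.2 == 'b')).length = pvCnt s.toList from rfl]
    simp only [Nat.add_zero, if_neg (by simp : ¬(false = true ∧ s.toList.head? = some 'b'))]
    rw [Bool.eq_iff_iff]
    simp
  · have hany : s.toList.any (fun c => !(['a', 'b', 'c'].contains c)) = true := by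
      rw [List.any_eq_true]
      push_neg at hv
      obtain ⟨c, hc, hne⟩ := hv
      exact ⟨c, hc, by simp_all⟩
    rw [h0, pvG_invalid s.toList false false hv, hany]
    simp
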